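-- pv_equiv track=rewrite | github.com/jano31415/codejam | codejam/y2021/around1/proba.py | solve
-- ===== SOURCE A (Python) =====
-- def solve(N, integers):
--     curr_min = integers[0]
--     count = 0
--     for i, x in enumerate(integers[1:]):
--         if x > curr_min:
--             curr_min = x
--             continue
--         if x == curr_min:
--             count+=1
--             curr_min = 10*x
--             continue
--         while x < curr_min:
--             str_x = str(x)
--             str_curr_min = str(curr_min)
--             if str_x == str(curr_min)[:len(str_x)]:
--                 if str(curr_min)[len(str_x):] != "9" * (len(str_curr_min) - len(str_x)):
--                     count += (len(str_curr_min) - len(str_x))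
--                     x = curr_min+1
--                     break
--
--             count += 1
--             x = 10*x
--         curr_min = x
--
--     return count
-- ===== SOURCE B (Python) =====
-- def solve(N, integers):
--     prev = integers[0]
--     count = 0
--     for x in integers[1:]:
--         if x > prev:
--             prev = x
--             continue
--         # closed form: smallest number with the digits of x as a prefix that exceeds prev
--         k = len(str(prev)) - len(str(x))
--         p10 = 10 ** k
--         lead = prev // p10
--         rest = prev % p10
--         if lead < x:                      # x already beats prev's leading digits
--             count += k
--             prev = x * p10
--         elif lead > x or rest == p10 - 1:  # must grow one digit longer than prev
--             count += k + 1
--             prev = x * p10 * 10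
--         else:                              # x is a prefix of prev with room for +1
--             count += k
--             prev = prev + 1
--     return count
-- ===== Notes on version B (the rewrite author's own statement) =====
-- stated objective: alternative
-- what changed: B replaces A's inner while loop (repeatedly appending a zero to x and re-testing string prefixes against curr_min) by a per-element closed form: one digit-length difference k, one floordiv/mod by 10^k, and a three-way comparison of x against prev's leading digits decide the appended count and the new prev directly.
-- outside the precondition, e.g. on solve(2, [-1, -1]): A returns 1, B returns 1; on solve(2, [-5, -50]): A does not finish within the time limit, B returns -1; on solve(2, [5, 0]): A does not finish within the time limit, B returns 1
import Mathlib
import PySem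

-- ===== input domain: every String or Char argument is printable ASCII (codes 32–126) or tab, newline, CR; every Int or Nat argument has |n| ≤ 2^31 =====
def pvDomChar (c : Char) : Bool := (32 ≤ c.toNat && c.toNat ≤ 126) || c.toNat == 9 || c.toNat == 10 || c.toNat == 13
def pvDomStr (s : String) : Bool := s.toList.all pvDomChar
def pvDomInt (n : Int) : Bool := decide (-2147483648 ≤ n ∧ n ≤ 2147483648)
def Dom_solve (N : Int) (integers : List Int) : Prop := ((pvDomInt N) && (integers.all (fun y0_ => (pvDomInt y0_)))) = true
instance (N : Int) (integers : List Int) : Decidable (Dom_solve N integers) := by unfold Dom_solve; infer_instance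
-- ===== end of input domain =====

-- B replaces A's append-a-zero-and-retest string while loop by a per-element closed form
-- (digit-length difference k, one floordiv/mod by 10^k, three-way comparison); equal results proved on Pre_solve.

-- ===== PORT A =====
-- A's inner 'while x < curr_min' loop. Python's while has no bound, so the port takes fuel;
-- under Pre_solve the loop runs at most len(str(curr_min))+1 times and the fuel chosen at the
-- call site (curr_min.toNat + 2) is never exhausted.
def solveWhile (fuel : Nat) (x curr_min count : Int) : Int × Int :=
  match fuel with
  | 0 => (x, count)
  | fuel + 1 =>
    if x < curr_min then
      let str_x := PySem.Int.toStr x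
      let str_curr_min := PySem.Int.toStr curr_min
      if str_x = PySem.Str.slice str_curr_min none (some (PySem.Str.len str_x)) then
        if PySem.Str.slice str_curr_min (some (PySem.Str.len str_x)) none ≠
            String.ofList (PySem.List.pyRepeat ['9'] (PySem.Str.len str_curr_min - PySem.Str.len str_x)) then
          (curr_min + 1, count + (PySem.Str.len str_curr_min - PySem.Str.len str_x))
        else solveWhile fuel (10 * x) curr_min (count + 1)
      else solveWhile fuel (10 * x) curr_min (count + 1)
    else (x, count)

def solveStepA (st : Int × Int) (ix : Int × Int) : Int × Int :=
  let x := ix.2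
  if x > st.1 then (x, st.2)
  else if x = st.1 then (10 * x, st.2 + 1)
  else
    let r := solveWhile (st.1.toNat + 2) x st.1 st.2
    (r.1, r.2)

def solve (N : Int) (integers : List Int) : Int :=
  match PySem.List.pyGet? integers 0 with
  | none => 0
  | some c0 =>
    ((PySem.List.enumerate (PySem.List.slice integers (some 1) none)).foldl solveStepA (c0, 0)).2

-- ===== PORT B =====
def solveStepB (st : Int × Int) (x : Int) : Int × Int :=
  let prev := st.1
  let count := st.2
  if x > prev then (x, count)
  else
    let k := PySem.Str.len (PySem.Int.toStr prev) - PySem.Str.len (PySem.Int.toStr x)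
    let p10 : Int := 10 ^ k.toNat
    let lead := PySem.Int.floordiv prev p10
    let rest := PySem.Int.mod prev p10
    if lead < x then (x * p10, count + k)
    else if lead > x ∨ rest = p10 - 1 then (x * p10 * 10, count + k + 1)
    else (prev + 1, count + k)

def solve_alt (N : Int) (integers : List Int) : Int :=
  match PySem.List.pyGet? integers 0 with
  | none => 0
  | some c0 => ((PySem.List.slice integers (some 1) none).foldl solveStepB (c0, 0)).2

-- ===== PRECONDITION & SPEC =====
-- Pre_ excludes the empty list (integers[0] raises IndexError) and lists in which some
-- element is < 1 without exceeding every earlier element: such an element can meet the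
-- digit-append loop with x < 1 < curr_min, where x = 10*x never catches up, so A loops
-- forever (x = 0) or grows |x| until str() raises ValueError (x < 0).
def Pre_solve (N : Int) (integers : List Int) : Prop :=
  integers ≠ [] ∧ ∀ i (hi : i < integers.length), 1 ≤ integers[i] ∨
    ∀ j (hj : j < i), integers[j] < integers[i]
instance (N : Int) (integers : List Int) : Decidable (Pre_solve N integers) := by
  unfold Pre_solve; infer_instance

def pvWitness_solve : Int × List Int := (3, [1, 9, 5])

def Spec_solve (N : Int) (integers : List Int) (out : Int) : Prop := out = solve_alt N integers
instance (N : Int) (integers : List Int) (out : Int) : Decidable (Spec_solve N integers out) := by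
  unfold Spec_solve; infer_instance

-- ===== CLAIM (what is proved, stated in full; the proofs are below) =====
def Claim_equal_solve : Prop := ∀ (N : Int) (integers : List Int), Dom_solve N integers → Pre_solve N integers → Spec_solve N integers (solve N integers)

-- ===== LEMMAS AND PROOFS =====

def mc (n : Nat) : List Char :=
  if n < 10 then [Nat.digitChar n] else mc (n / 10) ++ [Nat.digitChar (n % 10)]
decreasing_by exact Nat.div_lt_self (by omega) (by omega)

def mlen (n : Nat) : Nat := (mc n).length

def pad (n k : Nat) : List Char :=
  match k with
  | 0 => []
  | k + 1 => pad (n / 10) k ++ [Nat.digitChar (n % 10)]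

theorem tdc_eq : ∀ (f n : Nat) (ds : List Char), n < f →
    Nat.toDigitsCore 10 f n ds = mc n ++ ds := by
  intro f
  induction f with
  | zero => intro n ds h; omega
  | succ f ih =>
    intro n ds h
    rw [Nat.toDigitsCore]
    by_cases h10 : n < 10
    · have : n / 10 = 0 := by omega
      rw [if_pos this]
      rw [mc]
      have : n % 10 = n := by omega
      simp [h10, this]
    · have hd : ¬ (n / 10 = 0) := by omega
      rw [if_neg hd, ih (n / 10) _ (by omega)]
      conv_rhs => rw [mc]
      rw [if_neg h10]
      simp

theorem toDigits_eq (n : Nat) : Nat.toDigits 10 n = mc n := by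
  have := tdc_eq (n + 1) n [] (by omega)
  simpa [Nat.toDigits] using this

theorem toChars_nonneg (n : Int) (h : 0 ≤ n) : PySem.Int.toChars n = mc n.toNat := by
  rw [PySem.Int.toChars, if_neg (by omega), toDigits_eq]

theorem mlen_pos (n : Nat) : 1 ≤ mlen n := by
  unfold mlen
  rw [mc]
  split <;> simp

theorem mc_ten (n : Nat) (h : 1 ≤ n) : mc (10 * n) = mc n ++ ['0'] := by
  rw [mc]
  have h1 : ¬ (10 * n < 10) := by omega
  have h2 : 10 * n / 10 = n := by omega
  have h3 : 10 * n % 10 = 0 := by omega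
  simp [h1, h2, h3]
  rfl

theorem mlen_ten (n : Nat) (h : 1 ≤ n) : mlen (10 * n) = mlen n + 1 := by
  unfold mlen; rw [mc_ten n h]; simp

theorem mc_bounds (n : Nat) (h : 1 ≤ n) : 10 ^ (mlen n - 1) ≤ n ∧ n < 10 ^ (mlen n) := by
  induction n using Nat.strong_induction_on with
  | _ n ih =>
    by_cases h10 : n < 10
    · have : mlen n = 1 := by unfold mlen; rw [mc]; simp [h10]
      rw [this]; simpa using ⟨h, h10⟩
    · have hd1 : 1 ≤ n / 10 := by omega
      have hlt : n / 10 < n := Nat.div_lt_self (by omega) (by omega)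
      obtain ⟨lb, ub⟩ := ih (n / 10) hlt hd1
      have hm : mlen n = mlen (n / 10) + 1 := by
        unfold mlen; rw [mc]; simp [h10]
      have hp := mlen_pos (n / 10)
      constructor
      · calc 10 ^ (mlen n - 1) = 10 * 10 ^ (mlen (n/10) - 1) := by
              rw [hm]; rw [show mlen (n/10) + 1 - 1 = (mlen (n/10) - 1) + 1 by omega]; ring
        _ ≤ 10 * (n / 10) := by omega
        _ ≤ n := by omega
      · have : n < 10 * (n / 10) + 10 := by omega
        calc n < 10 * (n / 10 + 1) := by omega
        _ ≤ 10 * 10 ^ (mlen (n/10)) := by omega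
        _ = 10 ^ (mlen n) := by rw [hm]; ring

theorem mlen_mono (a b : Nat) (ha : 1 ≤ a) (hab : a ≤ b) : mlen a ≤ mlen b := by
  obtain ⟨la, _⟩ := mc_bounds a ha
  obtain ⟨_, ub⟩ := mc_bounds b (by omega)
  by_contra hc
  have : mlen b ≤ mlen a - 1 := by omega
  have : (10:Nat) ^ (mlen b) ≤ 10 ^ (mlen a - 1) := Nat.pow_le_pow_right (by omega) this
  omega

theorem pad_length (n k : Nat) : (pad n k).length = k := by
  induction k generalizing n with
  | zero => rfl
  | succ k ih => simp [pad, ih]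

theorem mc_split (k : Nat) : ∀ n : Nat, 10 ^ k ≤ n → mc n = mc (n / 10 ^ k) ++ pad n k := by
  induction k with
  | zero => intro n _; simp [pad]
  | succ k ih =>
    intro n hn
    have h10 : ¬ (n < 10) := by
      have : (10:Nat) ≤ 10 ^ (k+1) := by
        have := Nat.pow_le_pow_right (show 1 ≤ 10 by omega) (show 1 ≤ k + 1 by omega)
        simpa using this
      omega
    have hdiv : 10 ^ k ≤ n / 10 := by
      rw [Nat.le_div_iff_mul_le (by omega)]
      calc 10 ^ k * 10 = 10 ^ (k+1) := by ring
      _ ≤ n := hn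
    rw [mc]
    simp only [h10, if_neg, if_false]
    rw [ih (n / 10) hdiv]
    have : n / 10 / 10 ^ k = n / 10 ^ (k + 1) := by
      rw [Nat.div_div_eq_div_mul]; ring_nf
    rw [this, pad]
    simp

theorem digitChar_nine (a : Nat) (h : a < 10) : Nat.digitChar a = '9' ↔ a = 9 := by
  interval_cases a <;> simp [Nat.digitChar]

theorem mod_ten_split (n k : Nat) : n % 10 ^ (k + 1) = n % 10 + 10 * (n / 10 % 10 ^ k) := by
  have : (10:Nat) ^ (k+1) = 10 * 10 ^ k := by ring
  rw [this, Nat.mod_mul]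

theorem pad_nines (k : Nat) : ∀ n : Nat, (pad n k = List.replicate k '9' ↔ n % 10 ^ k = 10 ^ k - 1) := by
  induction k with
  | zero => intro n; simp [pad, Nat.mod_one]
  | succ k ih =>
    intro n
    have hrep : List.replicate (k+1) '9' = List.replicate k '9' ++ ['9'] := by
      rw [List.replicate_succ']
    have hb1 : n / 10 % 10 ^ k < 10 ^ k := Nat.mod_lt _ (by positivity)
    have hb2 : n % 10 < 10 := by omega
    have hp1 : (1:Nat) ≤ 10 ^ k := Nat.one_le_pow _ _ (by omega)
    rw [pad, hrep, mod_ten_split]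
    constructor
    · intro h
      obtain ⟨h1, h2⟩ := List.append_inj' h (by simp)
      have h3 := (ih (n / 10)).mp h1
      simp at h2
      have h4 := (digitChar_nine _ hb2).mp h2
      have : (10:Nat) ^ (k+1) = 10 * 10 ^ k := by ring
      omega
    · intro h
      have : (10:Nat) ^ (k+1) = 10 * 10 ^ k := by ring
      have h4 : n % 10 = 9 ∧ n / 10 % 10 ^ k = 10 ^ k - 1 := by omega
      rw [(ih (n / 10)).mpr h4.2, (digitChar_nine _ hb2).mpr h4.1]

theorem mc_inj (a : Nat) : ∀ b : Nat, mc a = mc b → a = b := by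
  induction a using Nat.strong_induction_on with
  | _ a ih =>
    intro b hab
    by_cases ha : a < 10 <;> by_cases hb : b < 10
    · rw [mc, if_pos ha] at hab
      conv_rhs at hab => rw [mc, if_pos hb]
      simp at hab
      revert hab
      interval_cases a <;> interval_cases b <;> simp [Nat.digitChar]
    · rw [mc, if_pos ha] at hab
      conv_rhs at hab => rw [mc, if_neg hb]
      have hp : 1 ≤ (mc (b / 10)).length := mlen_pos (b / 10)
      have hlen : (1:Nat) = (mc (b / 10)).length + 1 := by
        simpa using congrArg List.length hab
      omega
    · conv_rhs at hab => rw [mc, if_pos hb]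
      rw [mc, if_neg ha] at hab
      have hp : 1 ≤ (mc (a / 10)).length := mlen_pos (a / 10)
      have hlen : (mc (a / 10)).length + 1 = 1 := by
        simpa using congrArg List.length hab
      omega
    · rw [mc, if_neg ha] at hab
      conv_rhs at hab => rw [mc, if_neg hb]
      obtain ⟨h3, h4⟩ := List.append_inj' hab (by simp)
      have h5 := ih (a / 10) (Nat.div_lt_self (by omega) (by omega)) (b / 10) h3
      simp at h4
      have h6 : a % 10 = b % 10 := by
        have m1 : a % 10 < 10 := by omega
        have m2 : b % 10 < 10 := by omega
        revert h4
        interval_cases h : a % 10 <;> interval_cases h2 : b % 10 <;> simp [Nat.digitChar]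
      omega

theorem mlen_div (k n : Nat) (h : 10 ^ k ≤ n) : mlen (n / 10 ^ k) + k = mlen n := by
  have h1 := congrArg List.length (mc_split k n h)
  simp [pad_length] at h1
  simp only [mlen]
  omega

def closed (x p count : Int) (k : Nat) : Int × Int :=
  let lead : Int := ((p.toNat / 10 ^ k : Nat) : Int)
  if lead < x then (count + (k : Int), x * 10 ^ k)
  else if x < lead ∨ (p.toNat % 10 ^ k = 10 ^ k - 1) then (count + k + 1, x * 10 ^ (k + 1))
  else (count + k, p + 1)

theorem lenStr (n : Int) (h : 0 ≤ n) : PySem.Str.len (PySem.Int.toStr n) = ((mlen n.toNat : Nat) : Int) := by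
  rw [PySem.Str.len_eq, PySem.Int.toList_toStr, toChars_nonneg n h]
  rfl

theorem pow_le_self (y q : Nat) (hy : 1 ≤ y) (hyq : y ≤ q) :
    10 ^ (mlen q - mlen y) ≤ q := by
  have h1 := mlen_pos y
  have h2 := mlen_mono y q hy hyq
  have h3 := (mc_bounds q (by omega)).1
  calc 10 ^ (mlen q - mlen y) ≤ 10 ^ (mlen q - 1) := Nat.pow_le_pow_right (by omega) (by omega)
  _ ≤ q := h3

theorem take_mc (y q : Nat) (hy : 1 ≤ y) (hyq : y ≤ q) :
    (mc q).take (mlen y) = mc (q / 10 ^ (mlen q - mlen y)) := by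
  have hkq := pow_le_self y q hy hyq
  have hsplit := mc_split (mlen q - mlen y) q hkq
  have hdl := mlen_div (mlen q - mlen y) q hkq
  have h2 := mlen_mono y q hy hyq
  have hlen : (mc (q / 10 ^ (mlen q - mlen y))).length = mlen y := by
    show mlen _ = mlen y; omega
  rw [hsplit]
  exact List.take_left' hlen

theorem drop_mc (y q : Nat) (hy : 1 ≤ y) (hyq : y ≤ q) :
    (mc q).drop (mlen y) = pad q (mlen q - mlen y) := by
  have hkq := pow_le_self y q hy hyq
  have hsplit := mc_split (mlen q - mlen y) q hkq
  have hdl := mlen_div (mlen q - mlen y) q hkq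
  have h2 := mlen_mono y q hy hyq
  have hlen : (mc (q / 10 ^ (mlen q - mlen y))).length = mlen y := by
    show mlen _ = mlen y; omega
  rw [hsplit]
  exact List.drop_left' hlen

theorem c1_iff (x p : Int) (h1 : 1 ≤ x) (hxp : x ≤ p) :
    (PySem.Int.toStr x = PySem.Str.slice (PySem.Int.toStr p) none (some (PySem.Str.len (PySem.Int.toStr x))))
    ↔ x.toNat = p.toNat / 10 ^ (mlen p.toNat - mlen x.toNat) := by
  have hy : 1 ≤ x.toNat := by omega
  have hyq : x.toNat ≤ p.toNat := by omega
  rw [← String.toList_inj, PySem.Str.toList_slice, PySem.Chars.slice,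
      PySem.Int.toList_toStr, PySem.Int.toList_toStr, toChars_nonneg x (by omega),
      toChars_nonneg p (by omega), lenStr x (by omega)]
  rw [show ((mlen x.toNat : Nat) : Int) = ((mlen x.toNat : Nat) : Int) from rfl]
  rw [PySem.List.slice_to_natCast, take_mc x.toNat p.toNat hy hyq]
  exact ⟨mc_inj _ _, congrArg mc⟩

theorem c2_iff (x p : Int) (h1 : 1 ≤ x) (hxp : x ≤ p) :
    (PySem.Str.slice (PySem.Int.toStr p) (some (PySem.Str.len (PySem.Int.toStr x))) none
      = String.ofList (PySem.List.pyRepeat ['9'] (PySem.Str.len (PySem.Int.toStr p) - PySem.Str.len (PySem.Int.toStr x))))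
    ↔ p.toNat % 10 ^ (mlen p.toNat - mlen x.toNat) = 10 ^ (mlen p.toNat - mlen x.toNat) - 1 := by
  have hy : 1 ≤ x.toNat := by omega
  have hyq : x.toNat ≤ p.toNat := by omega
  have h2 := mlen_mono x.toNat p.toNat hy hyq
  rw [← String.toList_inj, PySem.Str.toList_slice, PySem.Chars.slice, String.toList_ofList,
      PySem.Int.toList_toStr, toChars_nonneg p (by omega), lenStr x (by omega), lenStr p (by omega),
      PySem.List.slice_from_natCast, drop_mc x.toNat p.toNat hy hyq,
      PySem.List.pyRepeat_singleton]
  rw [show (((mlen p.toNat : Nat) : Int) - ((mlen x.toNat : Nat) : Int)).toNat = mlen p.toNat - mlen x.toNat by omega]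
  exact pad_nines _ _

theorem stepB_closed (x p count : Int) (h1 : 1 ≤ x) (hxp : x ≤ p) :
    solveStepB (p, count) x =
      ((closed x p count (mlen p.toNat - mlen x.toNat)).2,
       (closed x p count (mlen p.toNat - mlen x.toNat)).1) := by
  have hy : 1 ≤ x.toNat := by omega
  have hyq : x.toNat ≤ p.toNat := by omega
  have h2 := mlen_mono x.toNat p.toNat hy hyq
  set K : Nat := mlen p.toNat - mlen x.toNat with hK
  unfold solveStepB closed
  simp only []
  rw [if_neg (by omega)]
  rw [lenStr x (by omega), lenStr p (by omega)]
  have hk1 : (((mlen p.toNat : Nat) : Int) - ((mlen x.toNat : Nat) : Int)) = (K : Int) := by omega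
  rw [hk1]
  have hk2 : ((K : Int)).toNat = K := by omega
  rw [hk2]
  have hpow : ((10:Int) ^ K) = (((10 ^ K : Nat) : Int)) := by push_cast; ring
  have hp' : p = ((p.toNat : Nat) : Int) := by omega
  have hdiv : PySem.Int.floordiv p (10 ^ K) = ((p.toNat / 10 ^ K : Nat) : Int) := by
    rw [PySem.Int.floordiv, hpow]
    conv_lhs => rw [hp']
    exact Int.ofNat_fdiv _ _ |>.symm
  have hmod : PySem.Int.mod p (10 ^ K) = ((p.toNat % 10 ^ K : Nat) : Int) := by
    rw [PySem.Int.mod, hpow]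
    conv_lhs => rw [hp']
    exact Int.ofNat_fmod _ _ |>.symm
  rw [hdiv, hmod]
  have h10K : (1:Nat) ≤ 10 ^ K := Nat.one_le_pow _ _ (by omega)
  by_cases hc1 : ((p.toNat / 10 ^ K : Nat) : Int) < x
  · rw [if_pos hc1, if_pos hc1]
  · rw [if_neg hc1, if_neg hc1]
    by_cases hc2 : ((p.toNat / 10 ^ K : Nat) : Int) > x ∨ ((p.toNat % 10 ^ K : Nat) : Int) = 10 ^ K - 1
    · rw [if_pos hc2, if_pos (by
        rcases hc2 with h | h
        · exact Or.inl h
        · right; omega)]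
      refine Prod.ext ?_ ?_ <;> simp [pow_succ] <;> ring
    · rw [if_neg hc2, if_neg (by
        intro hcon
        apply hc2
        rcases hcon with h | h
        · exact Or.inl h
        · right; omega)]

theorem lt_of_mlen_lt (a b : Nat) (ha : 1 ≤ a) (hb : 1 ≤ b) (h : mlen a < mlen b) : a < b := by
  have h1 := (mc_bounds a ha).2
  have h2 := (mc_bounds b hb).1
  have h3 : (10:Nat) ^ (mlen a) ≤ 10 ^ (mlen b - 1) := Nat.pow_le_pow_right (by omega) (by omega)
  omega

theorem ten_self_lt (y : Nat) (hy : 1 ≤ y) : 10 ^ (mlen y) ≤ 10 * y := by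
  have h1 := (mc_bounds y hy).1
  have hp := mlen_pos y
  calc (10:Nat) ^ (mlen y) = 10 * 10 ^ (mlen y - 1) := by
        rw [← pow_succ']; congr 1; omega
  _ ≤ 10 * y := by omega

theorem div_pow_succ (q k : Nat) : q / 10 ^ k / 10 = q / 10 ^ (k + 1) := by
  rw [Nat.div_div_eq_div_mul, ← pow_succ]

theorem closed_fst (x p count : Int) (K : Nat)
    (h : ((p.toNat / 10 ^ K : Nat) : Int) < x) :
    closed x p count K = (count + K, x * 10 ^ K) := by
  unfold closed; rw [if_pos h]

theorem closed_snd (x p count : Int) (K : Nat)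
    (h1 : ¬ ((p.toNat / 10 ^ K : Nat) : Int) < x)
    (h2 : x < ((p.toNat / 10 ^ K : Nat) : Int) ∨ p.toNat % 10 ^ K = 10 ^ K - 1) :
    closed x p count K = (count + K + 1, x * 10 ^ (K + 1)) := by
  unfold closed; rw [if_neg h1, if_pos h2]

theorem closed_mid (x p count : Int) (K : Nat)
    (h1 : ¬ ((p.toNat / 10 ^ K : Nat) : Int) < x)
    (h2 : ¬ (x < ((p.toNat / 10 ^ K : Nat) : Int) ∨ p.toNat % 10 ^ K = 10 ^ K - 1)) :
    closed x p count K = (count + K, p + 1) := by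
  unfold closed; rw [if_neg h1, if_neg h2]

theorem while_eq : ∀ (k fuel : Nat) (x p count : Int), 1 ≤ x → x < p →
    mlen p.toNat - mlen x.toNat = k → k + 2 ≤ fuel →
    solveWhile fuel x p count = ((closed x p count k).2, (closed x p count k).1) := by
  intro k
  induction k with
  | zero =>
    intro fuel x p count h1 hlt hk hf
    match fuel, hf with
    | f + 1, hf =>
    have hy : 1 ≤ x.toNat := by omega
    have hyq : x.toNat ≤ p.toNat := by omega
    have hq1 : 1 ≤ p.toNat := by omega
    have hml : mlen x.toNat = mlen p.toNat := by
      have := mlen_mono x.toNat p.toNat hy hyq; omega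
    -- the string-prefix test is false: it would force x = p
    have hc1 : ¬ (PySem.Int.toStr x = PySem.Str.slice (PySem.Int.toStr p) none (some (PySem.Str.len (PySem.Int.toStr x)))) := by
      rw [c1_iff x p h1 (by omega), hk]
      simp only [pow_zero, Nat.div_one]
      omega
    rw [solveWhile]
    rw [if_pos hlt, if_neg hc1]
    -- 10*x has one digit more than p, so the loop exits on re-entry
    have hexit : ¬ (10 * x < p) := by
      have hb := (mc_bounds x.toNat hy).1
      have hq := (mc_bounds p.toNat hq1).2
      have h10 := ten_self_lt x.toNat hy
      rw [hml] at h10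
      omega
    match f, hf with
    | f' + 1, _ =>
    rw [solveWhile, if_neg hexit]
    rw [closed_snd x p count 0 (by simp only [pow_zero, Nat.div_one]; omega)
        (by left; simp only [pow_zero, Nat.div_one]; omega)]
    refine Prod.ext ?_ ?_ <;> simp <;> ring
  | succ k ih =>
    intro fuel x p count h1 hlt hk hf
    match fuel, hf with
    | f + 1, hf =>
    have hy : 1 ≤ x.toNat := by omega
    have hyq : x.toNat ≤ p.toNat := by omega
    have hq1 : 1 ≤ p.toNat := by omega
    have hm := mlen_mono x.toNat p.toNat hy hyq
    have hKq : 10 ^ (k + 1) ≤ p.toNat := by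
      have := pow_le_self x.toNat p.toNat hy hyq
      rw [hk] at this; exact this
    have hx' : (10 * x).toNat = 10 * x.toNat := by omega
    have hten : mlen (10 * x).toNat = mlen x.toNat + 1 := by
      rw [hx']; exact mlen_ten x.toNat hy
    have hk' : mlen p.toNat - mlen (10 * x).toNat = k := by omega
    have hq10 : (1:Nat) ≤ 10 ^ k := Nat.one_le_pow _ _ (by omega)
    have hdd : p.toNat / 10 ^ k / 10 = p.toNat / 10 ^ (k + 1) := div_pow_succ _ _
    have hdm := Nat.div_add_mod (p.toNat / 10 ^ k) 10
    have hmod10 : p.toNat / 10 ^ k % 10 < 10 := by omega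
    rw [solveWhile, if_pos hlt]
    by_cases hc1 : x.toNat = p.toNat / 10 ^ (k + 1)
    · -- x's digits are a prefix of p's
      rw [if_pos (by rw [c1_iff x p h1 (by omega), hk]; exact hc1)]
      by_cases hc2 : p.toNat % 10 ^ (k + 1) = 10 ^ (k + 1) - 1
      · -- all-nine suffix: append a zero and recurse
        rw [if_neg (by
          simp only [ne_eq, not_not]
          rw [c2_iff x p h1 (by omega), hk]; exact hc2)]
        have hqval : p.toNat = 10 ^ (k+1) * x.toNat + (10 ^ (k+1) - 1) := by
          have h0 := Nat.div_add_mod p.toNat (10 ^ (k+1))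
          rw [← hc1] at h0
          omega
        have hK1 : (1:Nat) ≤ 10 ^ (k+1) := Nat.one_le_pow _ _ (by omega)
        have hyK : 10 * x.toNat ≤ 10 ^ (k+1) * x.toNat := by
          have : (10:Nat) ≤ 10 ^ (k+1) := by
            calc (10:Nat) = 10 ^ 1 := (pow_one 10).symm
            _ ≤ 10 ^ (k+1) := Nat.pow_le_pow_right (by omega) (by omega)
          exact Nat.mul_le_mul_right _ this
        have hlt' : 10 * x < p := by omega
        rw [ih f (10 * x) p (count + 1) (by omega) hlt' hk' (by omega)]
        have hlead' : p.toNat / 10 ^ k = 10 * x.toNat + 9 := by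
          have hval : p.toNat = 10 ^ k * (10 * x.toNat + 9) + (10 ^ k - 1) := by
            have hKs : (10:Nat) ^ (k+1) = 10 ^ k * 10 := by rw [pow_succ]
            have hring : 10 ^ k * (10 * x.toNat + 9) = 10 ^ (k+1) * x.toNat + 9 * 10 ^ k := by ring
            omega
          rw [hval, Nat.mul_add_div (by omega), Nat.div_eq_of_lt (by omega)]
        rw [closed_snd (10 * x) p (count + 1) k
            (by rw [hlead']; omega)
            (by left; rw [hlead']; omega)]
        rw [closed_snd x p count (k + 1)
            (by rw [← hc1]; omega)
            (by right; exact hc2)]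
        refine Prod.ext ?_ ?_ <;> simp [pow_succ] <;> push_cast <;> ring
      · -- proper prefix with room to add one
        rw [if_pos (by
          simp only [ne_eq]
          rw [c2_iff x p h1 (by omega), hk]; exact hc2)]
        rw [lenStr x (by omega), lenStr p (by omega)]
        rw [closed_mid x p count (k + 1)
            (by rw [← hc1]; omega)
            (by
              intro hcon
              rcases hcon with h | h
              · rw [← hc1] at h; omega
              · exact hc2 h)]
        refine Prod.ext ?_ ?_ <;> simp <;> omega
    · -- not a prefix: append a zero and recurse
      rw [if_neg (by rw [c1_iff x p h1 (by omega), hk]; exact hc1)]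
      rcases Nat.lt_or_ge x.toNat (p.toNat / 10 ^ (k+1)) with hcmp | hcmp
      · -- x below p's leading digits: must end one digit longer
        have hlead' : 10 * x.toNat < p.toNat / 10 ^ k := by
          have : 10 * (x.toNat + 1) ≤ 10 * (p.toNat / 10 ^ (k+1)) := by omega
          omega
        have hlt' : 10 * x < p := by
          have : p.toNat / 10 ^ k ≤ p.toNat := Nat.div_le_self _ _
          omega
        rw [ih f (10 * x) p (count + 1) (by omega) hlt' hk' (by omega)]
        rw [closed_snd (10 * x) p (count + 1) k
            (by omega)
            (by left; omega)]
        rw [closed_snd x p count (k + 1)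
            (by omega)
            (by left; omega)]
        refine Prod.ext ?_ ?_ <;> simp [pow_succ] <;> push_cast <;> ring
      · -- x above p's leading digits (strict, since not equal)
        have hgt : p.toNat / 10 ^ (k+1) < x.toNat := by omega
        have hlead' : p.toNat / 10 ^ k < 10 * x.toNat := by omega
        rcases Nat.eq_zero_or_pos k with hk0 | hkpos
        · -- one digit difference: the loop exits after this append
          subst hk0
          have hexit : ¬ (10 * x < p) := by
            simp only [pow_zero, Nat.div_one] at hlead'
            omega
          match f, hf with
          | f' + 1, _ =>
          rw [solveWhile, if_neg hexit]
          rw [closed_fst x p count 1 (by omega)]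
          refine Prod.ext ?_ ?_ <;> simp [pow_succ] <;> push_cast <;> ring
        · -- still shorter than p: recurse
          have hlt' : 10 * x < p := by
            have h1' : mlen (10 * x).toNat < mlen p.toNat := by omega
            have := lt_of_mlen_lt (10 * x).toNat p.toNat (by omega) hq1 h1'
            omega
          rw [ih f (10 * x) p (count + 1) (by omega) hlt' hk' (by omega)]
          rw [closed_fst (10 * x) p (count + 1) k (by omega)]
          rw [closed_fst x p count (k + 1) (by omega)]
          refine Prod.ext ?_ ?_ <;> simp [pow_succ] <;> push_cast <;> ring

theorem mlen_le_self (q : Nat) (h : 1 ≤ q) : mlen q ≤ q := by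
  have h1 := (mc_bounds q h).1
  have h2 := mlen_pos q
  have h3 : mlen q - 1 < 10 ^ (mlen q - 1) := Nat.lt_pow_self (by omega)
  omega

theorem step_eq (prev count x i : Int) (hp : 1 ≤ prev) (hx : 1 ≤ x) :
    solveStepA (prev, count) (i, x) = solveStepB (prev, count) x := by
  unfold solveStepA
  by_cases hgt : x > prev
  · rw [if_pos hgt]
    unfold solveStepB
    rw [if_pos hgt]
  · rw [if_neg hgt]
    by_cases heq : x = prev
    · rw [if_pos heq]
      rw [stepB_closed x prev count hx (by omega)]
      subst heq
      have hml : mlen x.toNat - mlen x.toNat = 0 := by omega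
      rw [hml, closed_snd x x count 0
        (by simp only [pow_zero, Nat.div_one]; omega)
        (by right; omega)]
      refine Prod.ext ?_ ?_ <;> simp <;> ring
    · rw [if_neg heq]
      have hlt : x < prev := by omega
      have hq1 : 1 ≤ prev.toNat := by omega
      have hkb : mlen prev.toNat - mlen x.toNat ≤ prev.toNat := by
        have := mlen_le_self prev.toNat hq1
        omega
      rw [stepB_closed x prev count hx (by omega)]
      simp only []
      rw [while_eq (mlen prev.toNat - mlen x.toNat) (prev.toNat + 2) x prev count hx hlt rfl
          (by omega)]

theorem stepB_pos (prev count x : Int) (hp : 1 ≤ prev) (hx : 1 ≤ x) :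
    1 ≤ (solveStepB (prev, count) x).1 := by
  by_cases hgt : x > prev
  · unfold solveStepB
    rw [if_pos hgt]
    exact hx
  · rw [stepB_closed x prev count hx (by omega)]
    have hpow : ∀ K : Nat, (1:Int) ≤ x * 10 ^ K := by
      intro K
      have h1 : (1:Int) ≤ 10 ^ K := one_le_pow₀ (by omega)
      calc (1:Int) = 1 * 1 := by ring
      _ ≤ x * 10 ^ K := by exact mul_le_mul hx h1 (by omega) (by omega)
    by_cases h1 : ((prev.toNat / 10 ^ (mlen prev.toNat - mlen x.toNat) : Nat) : Int) < x
    · rw [closed_fst _ _ _ _ h1]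
      exact hpow _
    · by_cases h2 : x < ((prev.toNat / 10 ^ (mlen prev.toNat - mlen x.toNat) : Nat) : Int) ∨
        prev.toNat % 10 ^ (mlen prev.toNat - mlen x.toNat) = 10 ^ (mlen prev.toNat - mlen x.toNat) - 1
      · rw [closed_snd _ _ _ _ h1 h2]
        exact hpow _
      · rw [closed_mid _ _ _ _ h1 h2]
        show (1:Int) ≤ prev + 1
        omega

theorem step_gt (prev count x i : Int) (h : prev < x) :
    solveStepA (prev, count) (i, x) = (x, count) ∧ solveStepB (prev, count) x = (x, count) := by
  constructor
  · unfold solveStepA; rw [if_pos (by exact h)]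
  · unfold solveStepB; rw [if_pos (by exact h)]

theorem fold_eq2 : ∀ (t q : List Int) (s prev count : Int),
    (∀ i (hi : i < t.length), 1 ≤ t[i] ∨ ((∀ e ∈ q, e < t[i]) ∧ ∀ j (hj : j < i), t[j] < t[i])) →
    ((1 ≤ prev ∧ ∃ e ∈ q, 1 ≤ e) ∨ (∃ e ∈ q, e ≤ 0 ∧ prev ≤ e)) →
    (PySem.List.enumerate t s).foldl solveStepA (prev, count) = t.foldl solveStepB (prev, count) := by
  intro t
  induction t with
  | nil => intro q s prev count _ _; rfl
  | cons x t' ih =>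
    intro q s prev count hpre hinv
    have hx0 := hpre 0 (by simp)
    simp only [List.getElem_cons_zero] at hx0
    rw [show PySem.List.enumerate (x :: t') s = (s, x) :: PySem.List.enumerate t' (s + 1) from rfl]
    simp only [List.foldl_cons]
    have hpre' : ∀ i (hi : i < t'.length),
        1 ≤ t'[i] ∨ ((∀ e ∈ q ++ [x], e < t'[i]) ∧ ∀ j (hj : j < i), t'[j] < t'[i]) := by
      intro i hi
      have := hpre (i + 1) (by simpa using Nat.succ_lt_succ hi)
      simp only [List.getElem_cons_succ] at this
      rcases this with h | ⟨hq, hj⟩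
      · exact Or.inl h
      · refine Or.inr ⟨?_, ?_⟩
        · intro e he
          rcases List.mem_append.mp he with he | he
          · exact hq e he
          · simp at he
            subst he
            have := hj 0 (by omega)
            simpa using this
        · intro j hj'
          have := hj (j + 1) (by omega)
          simpa using this
    by_cases hx1 : 1 ≤ x
    · rcases hinv with ⟨hp, _⟩ | ⟨e, he, he0, hpe⟩
      · rw [step_eq prev count x s hp hx1]
        rcases hB : solveStepB (prev, count) x with ⟨p', c'⟩
        have hp' : 1 ≤ p' := by
          have := stepB_pos prev count x hp hx1
          rw [hB] at this
          exact this
        rw [ih (q ++ [x]) (s + 1) p' c' hpre'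
            (Or.inl ⟨hp', x, by simp, hx1⟩)]
      · have hgt : prev < x := by omega
        obtain ⟨hA, hB⟩ := step_gt prev count x s hgt
        rw [hA, hB, ih (q ++ [x]) (s + 1) x count hpre' (Or.inl ⟨hx1, x, by simp, hx1⟩)]
    · rcases hx0 with h | ⟨hq, _⟩
      · omega
      · rcases hinv with ⟨hp, e, he, he1⟩ | ⟨e, he, he0, hpe⟩
        · have := hq e he; omega
        · have hgt : prev < x := by
            have := hq e he; omega
          obtain ⟨hA, hB⟩ := step_gt prev count x s hgt
          rw [hA, hB, ih (q ++ [x]) (s + 1) x count hpre'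
              (Or.inr ⟨x, by simp, by omega, le_refl x⟩)]

theorem solve_eq2 (N : Int) (integers : List Int) (hne : integers ≠ [])
    (hpre : ∀ i (hi : i < integers.length), 1 ≤ integers[i] ∨
      ∀ j (hj : j < i), integers[j] < integers[i]) :
    solve N integers = solve_alt N integers := by
  match integers, hne with
  | c0 :: t, _ =>
    unfold solve solve_alt
    have hget : PySem.List.pyGet? (c0 :: t) 0 = some c0 := by
      simp [PySem.List.pyGet?, PySem.List.pyIdx?]
    rw [hget, PySem.List.slice_from_one]
    show ((PySem.List.enumerate t 0).foldl solveStepA (c0, 0)).2 = (t.foldl solveStepB (c0, 0)).2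
    have hpre' : ∀ i (hi : i < t.length),
        1 ≤ t[i] ∨ ((∀ e ∈ [c0], e < t[i]) ∧ ∀ j (hj : j < i), t[j] < t[i]) := by
      intro i hi
      have := hpre (i + 1) (by simpa using Nat.succ_lt_succ hi)
      simp only [List.getElem_cons_succ] at this
      rcases this with h | hj
      · exact Or.inl h
      · refine Or.inr ⟨?_, ?_⟩
        · intro e he
          simp at he
          subst he
          have := hj 0 (by omega)
          simpa using this
        · intro j hj'
          have := hj (j + 1) (by omega)
          simpa using this
    have hinv : (1 ≤ c0 ∧ ∃ e ∈ [c0], (1:Int) ≤ e) ∨ (∃ e ∈ [c0], e ≤ 0 ∧ c0 ≤ e) := by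
      by_cases h : 1 ≤ c0
      · exact Or.inl ⟨h, c0, by simp, h⟩
      · exact Or.inr ⟨c0, by simp, by omega, le_refl c0⟩
    rw [fold_eq2 t [c0] 0 c0 0 hpre' hinv]

-- ===== VERDICT (by name: the statement is the Claim_ definition above) =====
theorem solve_spec : Claim_equal_solve := by
  intro N integers _ hpre
  unfold Spec_solve
  exact solve_eq2 N integers hpre.1 hpre.2
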